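-- pv_equiv track=rewrite | github.com/Greenun/algorithmPractice | coalgo/wine.py | solution
-- ===== SOURCE A (Python) =====
-- def solution(n, wine):
-- 	if n < 3:
-- 		return sum(wine)
-- 	table = [0]*(n+1)
-- 	table[1] = wine[0]
-- 	table[2] = wine[0] + wine[1]
-- 	for i in range(3, n+1):
-- 		table[i] = max(table[i-3] + wine[i-2] + wine[i-1], table[i-2] + wine[i-1], table[i-1])
-- 	return table[n]
-- ===== SOURCE B (Python) =====
-- def solution(n, wine):
--     if n < 3:
--         return sum(wine)
--     total = sum(wine[:n])
--     m3 = m2 = m1 = 0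
--     for i in range(3, n + 1):
--         m3, m2, m1 = m2, m1, min(m3 + wine[i - 3], m2 + wine[i - 2], m1 + wine[i - 1])
--     return total - m1
-- ===== Notes on version B (the rewrite author's own statement) =====
-- stated objective: alternative
-- what changed: Instead of A's table-building max-kept DP, B solves the complement problem: it computes the total of the first n glasses and subtracts the minimum total of skipped glasses, where the skip set must hit every window of three consecutive glasses (min-skip DP with O(1) state), so the answer is total minus minimum discarded rather than maximum kept.
import Mathlib
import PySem

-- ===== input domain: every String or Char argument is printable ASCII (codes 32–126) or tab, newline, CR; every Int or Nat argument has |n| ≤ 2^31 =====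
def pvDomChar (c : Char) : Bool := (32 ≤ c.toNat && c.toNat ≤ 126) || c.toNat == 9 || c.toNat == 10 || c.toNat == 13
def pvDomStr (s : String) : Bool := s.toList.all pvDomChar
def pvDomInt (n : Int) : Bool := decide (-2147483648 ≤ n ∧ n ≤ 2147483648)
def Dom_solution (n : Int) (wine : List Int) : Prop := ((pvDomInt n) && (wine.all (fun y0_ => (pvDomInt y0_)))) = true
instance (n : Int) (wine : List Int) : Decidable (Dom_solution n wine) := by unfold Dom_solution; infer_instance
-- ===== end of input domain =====

-- B solves the complement problem: total of the first n glasses minus the minimum total of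
-- skipped glasses (the skip set must hit every window of 3 consecutive glasses), instead of
-- A's table-building maximum-kept DP (objective: alternative).

-- ===== PORT A =====
def solution (n : Int) (wine : List Int) : Int :=
  if n < 3 then wine.sum
  else
    let table := PySem.List.pyRepeat [(0 : Int)] (n + 1)
    let table := PySem.List.pySetD table 1 (PySem.List.pyGetD wine 0 0)
    let table := PySem.List.pySetD table 2 (PySem.List.pyGetD wine 0 0 + PySem.List.pyGetD wine 1 0)
    let table := (PySem.List.pyRange 3 (n + 1) 1).foldl
      (fun t i => PySem.List.pySetD t i
        (max (max (PySem.List.pyGetD t (i - 3) 0 + PySem.List.pyGetD wine (i - 2) 0 + PySem.List.pyGetD wine (i - 1) 0)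
                  (PySem.List.pyGetD t (i - 2) 0 + PySem.List.pyGetD wine (i - 1) 0))
             (PySem.List.pyGetD t (i - 1) 0))) table
    PySem.List.pyGetD table n 0

-- ===== PORT B =====
def solution_alt (n : Int) (wine : List Int) : Int :=
  if n < 3 then wine.sum
  else
    let total := (PySem.List.slice wine none (some n)).sum
    let m := (PySem.List.pyRange 3 (n + 1) 1).foldl
      (fun (s : Int × Int × Int) i =>
        (s.2.1, s.2.2,
          min (min (s.1 + PySem.List.pyGetD wine (i - 3) 0)
                   (s.2.1 + PySem.List.pyGetD wine (i - 2) 0))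
              (s.2.2 + PySem.List.pyGetD wine (i - 1) 0)))
      ((0 : Int), (0 : Int), (0 : Int))
    total - m.2.2

-- ===== PRECONDITION & SPEC =====
-- A raises IndexError when 3 ≤ n but wine has fewer than n elements; those inputs are excluded.
def Pre_solution (n : Int) (wine : List Int) : Prop := n < 3 ∨ n ≤ (wine.length : Int)
instance (n : Int) (wine : List Int) : Decidable (Pre_solution n wine) := by unfold Pre_solution; infer_instance
def pvWitness_solution : Int × List Int := (4, [6, 10, 13, 9, 8, 1])

def Spec_solution (n : Int) (wine : List Int) (out : Int) : Prop := out = solution_alt n wine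
instance (n : Int) (wine : List Int) (out : Int) : Decidable (Spec_solution n wine out) := by unfold Spec_solution; infer_instance

-- ===== CLAIM (what is proved, stated in full; the proofs are below) =====
def Claim_equal_solution : Prop := ∀ (n : Int) (wine : List Int), Dom_solution n wine → Pre_solution n wine → Spec_solution n wine (solution n wine)

-- ===== LEMMAS AND PROOFS =====

-- A's DP values: pvT w k = A's table[k]
def pvT (w : List Int) : Nat → Int
  | 0 => 0
  | 1 => w.getD 0 0
  | 2 => w.getD 0 0 + w.getD 1 0
  | (k + 3) => max (max (pvT w k + w.getD (k + 1) 0 + w.getD (k + 2) 0)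
                        (pvT w (k + 1) + w.getD (k + 2) 0))
                   (pvT w (k + 2))

-- B's DP values: pvM w k = minimum total of skipped glasses among the first k
def pvM (w : List Int) : Nat → Int
  | 0 => 0
  | 1 => 0
  | 2 => 0
  | (k + 3) => min (min (pvM w k + w.getD k 0)
                        (pvM w (k + 1) + w.getD (k + 1) 0))
                   (pvM w (k + 2) + w.getD (k + 2) 0)

-- A's loop body as a named function (definitionally the lambda in the port)
def pvStepA (w : List Int) (t : List Int) (i : Int) : List Int :=
  PySem.List.pySetD t i
    (max (max (PySem.List.pyGetD t (i - 3) 0 + PySem.List.pyGetD w (i - 2) 0 + PySem.List.pyGetD w (i - 1) 0)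
              (PySem.List.pyGetD t (i - 2) 0 + PySem.List.pyGetD w (i - 1) 0))
         (PySem.List.pyGetD t (i - 1) 0))

-- B's loop body as a named function (definitionally the lambda in the port)
def pvStepB (w : List Int) (s : Int × Int × Int) (i : Int) : Int × Int × Int :=
  (s.2.1, s.2.2,
    min (min (s.1 + PySem.List.pyGetD w (i - 3) 0)
             (s.2.1 + PySem.List.pyGetD w (i - 2) 0))
        (s.2.2 + PySem.List.pyGetD w (i - 1) 0))

lemma pvTake_succ_sum (w : List Int) (k : Nat) :
    (w.take (k + 1)).sum = (w.take k).sum + w.getD k 0 := by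
  rw [List.take_succ, List.sum_append, List.getD_eq_getElem?_getD]
  cases w[k]? <;> simp

-- complement identity: kept-maximum = prefix total − skipped-minimum
lemma pvT_eq_pref_sub_pvM (w : List Int) : ∀ k, pvT w k = (w.take k).sum - pvM w k := by
  intro k
  induction k using Nat.strong_induction_on with
  | _ k ih =>
    match k with
    | 0 => simp [pvT, pvM]
    | 1 => simp [pvT, pvM, pvTake_succ_sum]
    | 2 => simp [pvT, pvM, pvTake_succ_sum w 1, pvTake_succ_sum w 0]
    | (k + 3) =>
      have h0 := ih k (by omega)
      have h1 := ih (k + 1) (by omega)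
      have h2 := ih (k + 2) (by omega)
      have p0 := pvTake_succ_sum w k
      have p1 := pvTake_succ_sum w (k + 1)
      rw [show k + 1 + 1 = k + 2 by omega] at p1
      have p2 := pvTake_succ_sum w (k + 2)
      rw [show k + 2 + 1 = k + 3 by omega] at p2
      simp only [pvT, pvM]
      omega

lemma pvA_inv (w : List Int) (m : Nat) (t0 : List Int) (ht0 : t0.length = m + 1)
    (h0 : ∀ j : Nat, j ≤ 2 → t0.getD j 0 = pvT w j) :
    ∀ k : Nat, 2 ≤ k → k ≤ m →
      ((PySem.List.pyRange 3 ((k : Int) + 1) 1).foldl (pvStepA w) t0).length = m + 1 ∧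
      ∀ j : Nat, j ≤ k → ((PySem.List.pyRange 3 ((k : Int) + 1) 1).foldl (pvStepA w) t0).getD j 0 = pvT w j := by
  intro k hk2
  induction k, hk2 using Nat.le_induction with
  | base =>
    intro _
    have hnil : PySem.List.pyRange 3 (((2 : Nat) : Int) + 1) 1 = [] :=
      PySem.List.pyRange_one_eq_nil (by norm_num)
    rw [hnil]
    exact ⟨ht0, h0⟩
  | succ k hk ih =>
    intro hkm
    obtain ⟨len_ih, get_ih⟩ := ih (by omega)
    obtain ⟨k', rfl⟩ : ∃ k', k = k' + 2 := ⟨k - 2, by omega⟩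
    have hsplit : PySem.List.pyRange 3 (((k' + 2 + 1 : Nat) : Int) + 1) 1
        = PySem.List.pyRange 3 (((k' + 2 : Nat) : Int) + 1) 1 ++ [((k' + 2 : Nat) : Int) + 1] := by
      have h3 : (3 : Int) ≤ ((k' + 2 : Nat) : Int) + 1 := by push_cast; omega
      have he : (((k' + 2 + 1 : Nat) : Int) + 1) = (((k' + 2 : Nat) : Int) + 1) + 1 := by push_cast; ring
      rw [he, PySem.List.pyRange_one_succ_right h3]
    rw [hsplit, List.foldl_append]
    set Fk := (PySem.List.pyRange 3 (((k' + 2 : Nat) : Int) + 1) 1).foldl (pvStepA w) t0 with hFk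
    have e4 : ((k' + 2 : Nat) : Int) + 1 = ((k' + 3 : Nat) : Int) := by push_cast; ring
    have e1 : ((k' + 3 : Nat) : Int) - 3 = ((k' : Nat) : Int) := by push_cast; ring
    have e2 : ((k' + 3 : Nat) : Int) - 2 = ((k' + 1 : Nat) : Int) := by push_cast; ring
    have e3 : ((k' + 3 : Nat) : Int) - 1 = ((k' + 2 : Nat) : Int) := by push_cast; ring
    simp only [List.foldl_cons, List.foldl_nil, pvStepA, e4, e1, e2, e3,
      PySem.List.pyGetD_natCast, PySem.List.pySetD_natCast]
    have hv : max (max (Fk.getD k' 0 + w.getD (k' + 1) 0 + w.getD (k' + 2) 0)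
                       (Fk.getD (k' + 1) 0 + w.getD (k' + 2) 0))
                  (Fk.getD (k' + 2) 0) = pvT w (k' + 3) := by
      rw [get_ih k' (by omega), get_ih (k' + 1) (by omega), get_ih (k' + 2) (by omega)]
      simp [pvT]
    rw [hv]
    have hlt : k' + 3 < Fk.length := by omega
    constructor
    · simp [List.length_set, len_ih]
    · intro j hj
      rcases Nat.lt_or_ge j (k' + 3) with hjlt | hjge
      · rw [List.getD_eq_getElem?_getD, List.getElem?_set_ne (by omega),
          ← List.getD_eq_getElem?_getD]
        exact get_ih j (by omega)
      · have hj3 : j = k' + 3 := by omega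
        subst hj3
        rw [List.getD_eq_getElem?_getD, List.getElem?_set_self hlt]
        rfl

lemma pvB_inv (w : List Int) :
    ∀ k' : Nat,
      (PySem.List.pyRange 3 (((k' + 2 : Nat) : Int) + 1) 1).foldl (pvStepB w) (0, 0, 0)
        = (pvM w k', pvM w (k' + 1), pvM w (k' + 2)) := by
  intro k'
  induction k' with
  | zero =>
    have hnil : PySem.List.pyRange 3 (((0 + 2 : Nat) : Int) + 1) 1 = [] :=
      PySem.List.pyRange_one_eq_nil (by norm_num)
    rw [hnil]
    simp [pvM]
  | succ k' ih =>
    have hsplit : PySem.List.pyRange 3 (((k' + 1 + 2 : Nat) : Int) + 1) 1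
        = PySem.List.pyRange 3 (((k' + 2 : Nat) : Int) + 1) 1 ++ [((k' + 2 : Nat) : Int) + 1] := by
      have h3 : (3 : Int) ≤ ((k' + 2 : Nat) : Int) + 1 := by push_cast; omega
      have he : (((k' + 1 + 2 : Nat) : Int) + 1) = (((k' + 2 : Nat) : Int) + 1) + 1 := by push_cast; ring
      rw [he, PySem.List.pyRange_one_succ_right h3]
    rw [hsplit, List.foldl_append, ih]
    have e1 : ((k' + 2 : Nat) : Int) + 1 - 3 = ((k' : Nat) : Int) := by push_cast; ring
    have e2 : ((k' + 2 : Nat) : Int) + 1 - 2 = ((k' + 1 : Nat) : Int) := by push_cast; ring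
    have e3 : ((k' + 2 : Nat) : Int) + 1 - 1 = ((k' + 2 : Nat) : Int) := by push_cast; ring
    simp only [List.foldl_cons, List.foldl_nil, pvStepB, e1, e2, e3, PySem.List.pyGetD_natCast]
    simp [pvM]

lemma pv_eq (n : Int) (wine : List Int) (hpre : Pre_solution n wine) :
    solution n wine = solution_alt n wine := by
  rcases lt_or_ge n 3 with hlt | hge
  · simp [solution, solution_alt, hlt]
  · have hn3 : ¬ n < 3 := by omega
    obtain ⟨m, rfl⟩ : ∃ m : Nat, n = (m : Int) := ⟨n.toNat, by omega⟩
    have hm3 : 3 ≤ m := by exact_mod_cast hge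
    have hg0 : PySem.List.pyGetD wine 0 0 = wine.getD 0 0 := PySem.List.pyGetD_zero wine 0
    have hg1 : PySem.List.pyGetD wine 1 0 = wine.getD 1 0 := by
      rw [show (1 : Int) = ((1 : Nat) : Int) from rfl, PySem.List.pyGetD_natCast]
    -- A's initialized table
    set t0 : List Int :=
      PySem.List.pySetD (PySem.List.pySetD (PySem.List.pyRepeat [(0 : Int)] ((m : Int) + 1)) 1
        (PySem.List.pyGetD wine 0 0)) 2
        (PySem.List.pyGetD wine 0 0 + PySem.List.pyGetD wine 1 0) with ht0def
    have hrep : PySem.List.pyRepeat [(0 : Int)] ((m : Int) + 1) = List.replicate (m + 1) 0 := by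
      rw [PySem.List.pyRepeat_singleton]
      congr 1
    have ht0eq : t0 = ((List.replicate (m + 1) (0 : Int)).set 1 (wine.getD 0 0)).set 2
        (wine.getD 0 0 + wine.getD 1 0) := by
      rw [ht0def, hrep, hg0, hg1]
      norm_num [PySem.List.pySetD_of_nonneg]
      rfl
    have ht0 : t0.length = m + 1 := by simp [ht0eq]
    have h0 : ∀ j : Nat, j ≤ 2 → t0.getD j 0 = pvT wine j := by
      intro j hj
      interval_cases j <;>
        simp [ht0eq, pvT, List.getD_eq_getElem?_getD, List.getElem?_set, List.getElem?_replicate,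
          show 0 < m from by omega, show 2 ≤ m from by omega,
          show (0 : Nat) < m + 1 from by omega, show 1 < m + 1 from by omega,
          show 2 < m + 1 from by omega]
    have hA := pvA_inv wine m t0 ht0 h0 m (by omega) (le_refl m)
    have hAval : solution ((m : Nat) : Int) wine = pvT wine m := by
      unfold solution
      rw [if_neg hn3]
      show PySem.List.pyGetD ((PySem.List.pyRange 3 (((m : Nat) : Int) + 1) 1).foldl (pvStepA wine) t0)
        ((m : Nat) : Int) 0 = pvT wine m
      rw [PySem.List.pyGetD_natCast]
      exact hA.2 m (le_refl m)
    -- B's value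
    obtain ⟨k', rfl⟩ : ∃ k', m = k' + 2 := ⟨m - 2, by omega⟩
    have hBval : solution_alt ((k' + 2 : Nat) : Int) wine
        = (wine.take (k' + 2)).sum - pvM wine (k' + 2) := by
      unfold solution_alt
      rw [if_neg hn3]
      show (PySem.List.slice wine none (some ((k' + 2 : Nat) : Int))).sum
          - ((PySem.List.pyRange 3 (((k' + 2 : Nat) : Int) + 1) 1).foldl (pvStepB wine) (0, 0, 0)).2.2
        = (wine.take (k' + 2)).sum - pvM wine (k' + 2)
      rw [PySem.List.slice_to_natCast, pvB_inv wine k']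
    rw [hAval, hBval, pvT_eq_pref_sub_pvM]

theorem solution_spec : Claim_equal_solution := by
  intro n wine _ hpre
  unfold Spec_solution
  exact pv_eq n wine hpre
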